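-- pv_equiv track=rewrite | github.com/prafdin/CryptoLabs | Lab1/windows/block_cipher_window.py | process_key
-- ===== SOURCE A (Python) =====
-- def process_key(key: str):
--     key = key.strip()
--     if "," in key:
--         raise Exception("Use spaces as delimiter for input key")
--
--     splited_key = [int(char) for char in key.split(" ")]
--
--     if len(set(splited_key)) != len(splited_key):
--         raise Exception("Duplicates occurred in key")
--
--     return splited_key
-- ===== SOURCE B (Python) =====
-- def process_key(key: str):
--     key = key.strip()
--     if "," in key:
--         raise Exception("Use spaces as delimiter for input key")
--
--     splited_key = [int(char) for char in key.split(" ")]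
--
--     # duplicate detection by sort + adjacent-pair scan instead of set-size comparison
--     s = sorted(splited_key)
--     for a, b in zip(s, s[1:]):
--         if a == b:
--             raise Exception("Duplicates occurred in key")
--
--     return splited_key
-- ===== Notes on version B (the rewrite author's own statement) =====
-- stated objective: alternative
-- what changed: Duplicate detection is done by sorting a copy of the parsed key and scanning adjacent pairs for an equal neighbour, instead of comparing len(set(...)) with len(...).
import Mathlib
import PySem

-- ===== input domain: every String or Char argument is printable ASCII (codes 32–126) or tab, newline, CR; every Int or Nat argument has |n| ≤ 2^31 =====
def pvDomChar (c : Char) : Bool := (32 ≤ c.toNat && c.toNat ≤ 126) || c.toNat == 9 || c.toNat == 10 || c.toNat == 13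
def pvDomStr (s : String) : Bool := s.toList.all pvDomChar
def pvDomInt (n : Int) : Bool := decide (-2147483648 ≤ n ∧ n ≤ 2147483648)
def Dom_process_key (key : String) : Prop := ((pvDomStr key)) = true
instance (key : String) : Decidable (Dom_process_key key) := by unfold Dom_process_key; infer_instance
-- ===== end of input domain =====

-- B detects duplicates by sorting a copy and scanning adjacent pairs instead of comparing len(set(...)) with len(...); same results.

-- ===== PORT A =====
def process_key (key : String) : List Int :=
  let k := PySem.Str.strip key
  if PySem.Str.isIn "," k then []  -- raise Exception("Use spaces as delimiter for input key"); excluded by Pre_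
  else
    let splited_key := ((PySem.Str.split? k " ").getD []).map (fun c => (PySem.Int.ofStr? c).getD 0)
    if PySem.Set.len (PySem.Set.ofList splited_key) ≠ splited_key.length then []  -- raise Exception("Duplicates occurred in key"); excluded by Pre_
    else splited_key

-- ===== PORT B =====
-- the 'for a, b in zip(s, s[1:]): if a == b: raise' scan of Source B
def hasAdjDup : List Int → Bool
  | a :: b :: t => a == b || hasAdjDup (b :: t)
  | _ => false

def process_key_alt (key : String) : List Int :=
  let k := PySem.Str.strip key
  if PySem.Str.isIn "," k then []  -- raise; excluded by Pre_
  else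
    let splited_key := ((PySem.Str.split? k " ").getD []).map (fun c => (PySem.Int.ofStr? c).getD 0)
    let s := PySem.List.sorted splited_key (fun x => x) false
    if hasAdjDup s then []  -- raise; excluded by Pre_
    else splited_key

-- ===== PRECONDITION & SPEC =====
-- Pre_ excludes exactly the inputs on which A raises: a comma in the stripped key, a
-- space-separated piece that is not a valid int literal (e.g. an empty piece produced by adjacent spaces or an empty key),
-- or a duplicate value among the parsed ints.
def Pre_process_key (key : String) : Prop :=
  PySem.Str.isIn "," (PySem.Str.strip key) = false ∧
  (∀ p ∈ (PySem.Str.split? (PySem.Str.strip key) " ").getD [], (PySem.Int.ofStr? p).isSome = true) ∧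
  (((PySem.Str.split? (PySem.Str.strip key) " ").getD []).map (fun c => (PySem.Int.ofStr? c).getD 0)).Nodup

instance (key : String) : Decidable (Pre_process_key key) := by unfold Pre_process_key; infer_instance

def pvWitness_process_key : String := "3 1 2"

def Spec_process_key (key : String) (out : List Int) : Prop := out = process_key_alt key
instance (key : String) (out : List Int) : Decidable (Spec_process_key key out) := by unfold Spec_process_key; infer_instance

-- ===== CLAIM (what is proved, stated in full; the proofs are below) =====
def Claim_equal_process_key : Prop := ∀ (key : String), Dom_process_key key → Pre_process_key key → Spec_process_key key (process_key key)

-- ===== LEMMAS AND PROOFS =====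
theorem hasAdjDup_eq_false (l : List Int) (hp : l.Pairwise (· ≤ ·)) (hn : l.Nodup) :
    hasAdjDup l = false := by
  induction l with
  | nil => rfl
  | cons a t ih =>
    cases t with
    | nil => rfl
    | cons b u =>
      have hab : a ≠ b := by
        have := (List.nodup_cons.mp hn).1
        simp at this
        exact this.1
      simp [hasAdjDup, hab]
      exact ih hp.tail hn.tail

-- ===== VERDICT (by name: the statement is the Claim_ definition above) =====
theorem process_key_spec : Claim_equal_process_key := by
  intro key _ hpre
  obtain ⟨h1, _h2, h3⟩ := hpre
  unfold Spec_process_key process_key process_key_alt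
  simp only [h1, if_false, Bool.false_eq_true]
  set xs := ((PySem.Str.split? (PySem.Str.strip key) " ").getD []).map
      (fun c => (PySem.Int.ofStr? c).getD 0) with hxs
  have he : PySem.Set.ofList xs = xs := PySem.Set.ofList_eq_self_of_nodup xs h3
  have hA : PySem.Set.len (PySem.Set.ofList xs) = xs.length := by
    rw [he]; rfl
  have hsortnd : (PySem.List.sorted xs (fun x => x) false).Nodup :=
    (PySem.List.sorted_perm xs (fun x => x) false).nodup_iff.mpr h3
  have hB : hasAdjDup (PySem.List.sorted xs (fun x => x) false) = false :=
    hasAdjDup_eq_false _ (PySem.List.sorted_pairwise xs (fun x => x)) hsortnd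
  simp only [hA, hB, ne_eq, not_true_eq_false, if_false, Bool.false_eq_true]
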